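-- pv_equiv track=rewrite | github.com/openharmony/testfwk_xdevice | src/xdevice/_core/report/reporter_helper.py | _render_product_info
-- ===== SOURCE A (Python) =====
-- def _render_product_info(file_context, devices):
--     """Construct product info context and render it to file context"""
--     render_result = ""
--     for index, device in enumerate(devices, 1):
--         others = device.get("others", "")
--         if len(others) == 0:
--             continue
--         tmp, count = "", 0
--         tbody_content = ""
--         for k, v in others.items():
--             tmp += f'<td class="key">{k}:</td>\n<td class="value">{v}</td>\n'
--             count += 1
--             if count == 2:
--                 tbody_content += "<tr>" + tmp + "<tr>\n"
--                 tmp, count = "", 0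
--         if tmp != "":
--             tbody_content += "<tr>" + tmp + "<tr>\n"
--         render_dialog = f"""<div id="dialog{index}" , class="el-dialog">
--             <div style="margin: 15% auto; width: 60%;">
--                 <div class="el-dialog__header">
--                     <button class="el-dialog__close" onclick="hideDialog()">关闭</button>
--                 </div>
--                 <div class="el-dialog__body">
--                     <table class="el-dialog__table">
--                         <tbody>
--                             {tbody_content}
--                         </tbody>
--                     </table>
--                 </div>
--             </div>
--         </div>
--         """
--         render_result += render_dialog
--     replace_str = "<!--{devices.dialogs}-->"
--     return file_context.replace(replace_str, render_result)
-- ===== SOURCE B (Python) =====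
-- # B: per-device dialog via join over enumerate, and rows built by recursion on
-- # two-element chunks of the items list (instead of A's counter-and-flush loop).
--
-- _TEMPLATE_PRE = '<div id="dialog'
-- _TEMPLATE_MID = '''" , class="el-dialog">
--             <div style="margin: 15% auto; width: 60%;">
--                 <div class="el-dialog__header">
--                     <button class="el-dialog__close" onclick="hideDialog()">关闭</button>
--                 </div>
--                 <div class="el-dialog__body">
--                     <table class="el-dialog__table">
--                         <tbody>
--                             '''
-- _TEMPLATE_POST = '''
--                         </tbody>
--                     </table>
--                 </div>
--             </div>
--         </div>
--         '''
--
--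
-- def _rows(items):
--     if not items:
--         return ""
--     tmp = "".join(f'<td class="key">{k}:</td>\n<td class="value">{v}</td>\n'
--                   for k, v in items[:2])
--     return "<tr>" + tmp + "<tr>\n" + _rows(items[2:])
--
--
-- def _dialog(index, device):
--     others = device.get("others", "")
--     if len(others) == 0:
--         return ""
--     return (_TEMPLATE_PRE + str(index) + _TEMPLATE_MID
--             + _rows(list(others.items())) + _TEMPLATE_POST)
--
--
-- def _render_product_info(file_context, devices):
--     dialogs = "".join(_dialog(i, d) for i, d in enumerate(devices, 1))
--     return file_context.replace("<!--{devices.dialogs}-->", dialogs)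
-- ===== Notes on version B (the rewrite author's own statement) =====
-- stated objective: simpler
-- what changed: Each device's table body is built by recursing over the items list in two-element chunks (short last chunk included), replacing A's counter-and-flush loop plus post-loop remainder flush; dialogs are produced per device and joined instead of string-accumulated.
import Mathlib
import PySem

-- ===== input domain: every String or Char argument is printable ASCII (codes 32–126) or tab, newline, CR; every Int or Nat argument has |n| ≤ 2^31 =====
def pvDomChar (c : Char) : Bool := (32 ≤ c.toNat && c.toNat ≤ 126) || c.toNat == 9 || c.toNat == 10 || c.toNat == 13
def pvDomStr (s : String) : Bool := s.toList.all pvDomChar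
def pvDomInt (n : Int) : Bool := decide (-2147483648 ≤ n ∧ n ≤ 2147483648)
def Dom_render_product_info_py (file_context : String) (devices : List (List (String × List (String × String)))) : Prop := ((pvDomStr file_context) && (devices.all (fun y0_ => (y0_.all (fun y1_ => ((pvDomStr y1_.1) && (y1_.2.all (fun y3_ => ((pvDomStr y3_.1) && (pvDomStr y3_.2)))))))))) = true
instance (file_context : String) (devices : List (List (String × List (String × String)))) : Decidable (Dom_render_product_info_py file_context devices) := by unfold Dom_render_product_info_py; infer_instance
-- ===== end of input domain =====

-- B renders each device's rows by recursing over the items list two entries at a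
-- time and joins the per-device dialogs, instead of A's counter-and-flush loop
-- with a trailing remainder flush (objective: simpler decomposition, same cost;
-- A's literal '<tr>' closing tag and whitespace are reproduced exactly).

-- markup shared verbatim by both f-strings
def pvCell (kv : String × String) : String :=
  "<td class=\"key\">" ++ kv.1 ++ ":</td>\n<td class=\"value\">" ++ kv.2 ++ "</td>\n"
def pvTplPre : String := "<div id=\"dialog"
def pvTplMid : String := "\" , class=\"el-dialog\">\n            <div style=\"margin: 15% auto; width: 60%;\">\n                <div class=\"el-dialog__header\">\n                    <button class=\"el-dialog__close\" onclick=\"hideDialog()\">关闭</button>\n                </div>\n                <div class=\"el-dialog__body\">\n                    <table class=\"el-dialog__table\">\n                        <tbody>\n                            "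
def pvTplPost : String := "\n                        </tbody>\n                    </table>\n                </div>\n            </div>\n        </div>\n        "

-- ===== PORT A =====
-- A's inner loop body: state (tmp, count, tbody_content)
def pvStepA (st : String × Int × String) (kv : String × String) : String × Int × String :=
  let tmp := st.1 ++ pvCell kv
  let count := st.2.1 + 1
  if count == 2 then ("", 0, st.2.2 ++ "<tr>" ++ tmp ++ "<tr>\n")
  else (tmp, count, st.2.2)

def render_product_info_py (file_context : String) (devices : List (List (String × List (String × String)))) : String :=
  let render_result :=
    (PySem.List.enumerate devices 1).foldl (fun render_result p =>
      match (PySem.Dict.ofList p.2).get? "others" with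
      | none => render_result          -- others = "", len 0 → continue
      | some others =>
        let od := PySem.Dict.ofList others
        if od.size == 0 then render_result   -- continue
        else
          let s := od.items.foldl pvStepA ("", 0, "")
          let tbody_content := if s.1 != "" then s.2.2 ++ "<tr>" ++ s.1 ++ "<tr>\n" else s.2.2
          render_result ++
            (pvTplPre ++ PySem.Int.toStr p.1 ++ pvTplMid ++ tbody_content ++ pvTplPost)) ""
  PySem.Str.replace file_context "<!--{devices.dialogs}-->" render_result

-- ===== PORT B =====
-- Source B _rows: recursion on two-element chunks (items[:2] joined, recurse on items[2:])
def pvRows : List (String × String) → String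
  | [] => ""
  | [kv] => "<tr>" ++ pvCell kv ++ "<tr>\n" ++ pvRows []
  | kv1 :: kv2 :: rest => "<tr>" ++ (pvCell kv1 ++ pvCell kv2) ++ "<tr>\n" ++ pvRows rest

-- Source B _dialog
def pvDialog (index : Int) (device : List (String × List (String × String))) : String :=
  match (PySem.Dict.ofList device).get? "others" with
  | none => ""
  | some others =>
    let od := PySem.Dict.ofList others
    if od.size == 0 then ""
    else pvTplPre ++ PySem.Int.toStr index ++ pvTplMid ++ pvRows od.items ++ pvTplPost

def render_product_info_py_alt (file_context : String) (devices : List (List (String × List (String × String)))) : String :=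
  let dialogs := PySem.Str.join "" ((PySem.List.enumerate devices 1).map (fun p => pvDialog p.1 p.2))
  PySem.Str.replace file_context "<!--{devices.dialogs}-->" dialogs

-- ===== PRECONDITION & SPEC =====
def Spec_render_product_info_py (file_context : String) (devices : List (List (String × List (String × String)))) (out : String) : Prop := out = render_product_info_py_alt file_context devices
instance (file_context : String) (devices : List (List (String × List (String × String)))) (out : String) : Decidable (Spec_render_product_info_py file_context devices out) := by unfold Spec_render_product_info_py; infer_instance

-- ===== CLAIM (what is proved, stated in full; the proofs are below) =====
def Claim_equal_render_product_info_py : Prop := ∀ (file_context : String) (devices : List (List (String × List (String × String)))), Dom_render_product_info_py file_context devices → Spec_render_product_info_py file_context devices (render_product_info_py file_context devices)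

-- ===== LEMMAS AND PROOFS =====

theorem pvCell_ne_empty (kv : String × String) : (pvCell kv != "") = true := by
  simp [pvCell, String.ext_iff]

theorem pvJoin_nil : PySem.Str.join "" [] = "" := by
  simp [PySem.Str.join, PySem.Chars.join, List.intercalate]

theorem pvJoin_cons (x : String) (xs : List String) :
    PySem.Str.join "" (x :: xs) = x ++ PySem.Str.join "" xs := by
  simp only [PySem.Str.join, PySem.Chars.join, String.ext_iff, List.map]
  cases xs <;> simp [List.intercalate]

-- A's counter-and-flush inner loop followed by the remainder flush equals B's
-- chunked recursion, with the tbody accumulated so far generalized to acc.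
theorem pvRowsEq : ∀ (items : List (String × String)) (acc : String),
    (let s := items.foldl pvStepA ("", 0, acc)
     if s.1 != "" then s.2.2 ++ "<tr>" ++ s.1 ++ "<tr>\n" else s.2.2) = acc ++ pvRows items
  | [], acc => by simp [pvRows]
  | [kv], acc => by
    simp [pvStepA, pvRows, pvCell_ne_empty, String.append_assoc]
  | kv1 :: kv2 :: rest, acc => by
    show (let s := rest.foldl pvStepA (pvStepA (pvStepA ("", 0, acc) kv1) kv2)
          if s.1 != "" then s.2.2 ++ "<tr>" ++ s.1 ++ "<tr>\n" else s.2.2) = _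
    have h : pvStepA (pvStepA ("", 0, acc) kv1) kv2
        = ("", 0, acc ++ "<tr>" ++ ("" ++ pvCell kv1 ++ pvCell kv2) ++ "<tr>\n") := by
      simp [pvStepA]
    rw [h, pvRowsEq rest]
    simp [pvRows, String.ext_iff]

-- A's render_result fold over enumerate equals the join of B's per-device dialogs.
theorem pvOuterEq : ∀ (l : List (Int × List (String × List (String × String)))) (acc : String),
    l.foldl (fun render_result p =>
      match (PySem.Dict.ofList p.2).get? "others" with
      | none => render_result
      | some others =>
        let od := PySem.Dict.ofList others
        if od.size == 0 then render_result
        else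
          let s := od.items.foldl pvStepA ("", 0, "")
          let tbody_content := if s.1 != "" then s.2.2 ++ "<tr>" ++ s.1 ++ "<tr>\n" else s.2.2
          render_result ++
            (pvTplPre ++ PySem.Int.toStr p.1 ++ pvTplMid ++ tbody_content ++ pvTplPost)) acc
    = acc ++ PySem.Str.join "" (l.map (fun p => pvDialog p.1 p.2))
  | [], acc => by simp [pvJoin_nil]
  | p :: rest, acc => by
    rw [List.foldl_cons, List.map_cons, pvJoin_cons, pvOuterEq rest]
    have hbody : (match (PySem.Dict.ofList p.2).get? "others" with
      | none => acc
      | some others =>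
        let od := PySem.Dict.ofList others
        if od.size == 0 then acc
        else
          let s := od.items.foldl pvStepA ("", 0, "")
          let tbody_content := if s.1 != "" then s.2.2 ++ "<tr>" ++ s.1 ++ "<tr>\n" else s.2.2
          acc ++ (pvTplPre ++ PySem.Int.toStr p.1 ++ pvTplMid ++ tbody_content ++ pvTplPost))
        = acc ++ pvDialog p.1 p.2 := by
      unfold pvDialog
      cases (PySem.Dict.ofList p.2).get? "others" with
      | none => simp
      | some others =>
        by_cases h : (PySem.Dict.ofList others).size == 0
        · simp [h]
        · simp only [h, if_false, Bool.false_eq_true]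
          rw [pvRowsEq]
          simp
    rw [hbody, String.append_assoc]

-- ===== VERDICT (by name: the statement is the Claim_ definition above) =====
theorem render_product_info_py_spec : Claim_equal_render_product_info_py := by
  intro file_context devices _
  show render_product_info_py file_context devices = render_product_info_py_alt file_context devices
  unfold render_product_info_py render_product_info_py_alt
  rw [pvOuterEq]
  simp
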